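-- pv_equiv track=rewrite | github.com/Salazar769/Ciclo-1-python | calculadorapablo.py | split_en_tokens
-- ===== SOURCE A (Python) =====
-- funciones = ['sqroot', 'cos', 'sen', 'tan']
--
-- def split_en_tokens(exp):
--     #separa en tokens (uno o mas caracteres) una expresion, de forma que se puedan agrupar
--     #para validarlos en funciones
--     token = ''
--     token_list = []
--     for char in exp:
--         if token in funciones:
--             token_list.append(token)
--             token = ''
--         token += char
--     token_list.append(token)
--     if len(token_list) > 0:
--         if token_list[0] not in funciones:
--             token_list = []
--     return token_list
-- ===== SOURCE B (Python) =====
-- funciones = ['sqroot', 'cos', 'sen', 'tan']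
--
-- def split_en_tokens(exp):
--     # Idiomatic greedy tokenizer: prefix-match whole function names and jump by
--     # their length, instead of growing a token character by character.
--     tokens = []
--     i = 0
--     n = len(exp)
--     while i < n:
--         f = next((f for f in funciones if exp.startswith(f, i)), None)
--         if f is None:
--             tokens.append(exp[i:])
--             break
--         tokens.append(f)
--         i += len(f)
--     if tokens and tokens[0] not in funciones:
--         return []
--     return tokens
-- ===== Notes on version B (the rewrite author's own statement) =====
-- stated objective: idiomatic
-- what changed: Replaces A's char-by-char token accumulation with flush-on-membership by an explicit pointer that greedily prefix-matches whole function names, jumps by their length, and emits the unmatched remainder as one slice.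
import Mathlib
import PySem

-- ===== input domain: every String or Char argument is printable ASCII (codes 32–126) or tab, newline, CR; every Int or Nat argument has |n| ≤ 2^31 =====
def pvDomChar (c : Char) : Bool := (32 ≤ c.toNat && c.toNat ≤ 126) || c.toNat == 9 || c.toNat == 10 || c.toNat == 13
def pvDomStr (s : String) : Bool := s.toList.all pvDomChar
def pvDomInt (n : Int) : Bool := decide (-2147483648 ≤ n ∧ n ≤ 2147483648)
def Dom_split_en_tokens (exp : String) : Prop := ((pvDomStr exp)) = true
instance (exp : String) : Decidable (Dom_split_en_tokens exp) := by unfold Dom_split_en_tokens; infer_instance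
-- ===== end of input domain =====

-- B replaces A's char-by-char token growth by greedy prefix matching of whole
-- function names with length jumps (idiomatic decomposition; same O(n) cost).


-- funciones = ['sqroot', 'cos', 'sen', 'tan']  (kept as char lists; strings rebuilt at the end)
def pvF : List (List Char) := ["sqroot".toList, "cos".toList, "sen".toList, "tan".toList]

-- ===== PORT A =====
-- the for-loop of A: state (token, token_list)
def pvAgo : List Char → List Char → List (List Char) → List Char × List (List Char)
  | [], token, acc => (token, acc)
  | c :: cs, token, acc =>
    if token ∈ pvF then pvAgo cs ([] ++ [c]) (acc ++ [token])
    else pvAgo cs (token ++ [c]) acc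

def split_en_tokens (exp : String) : List String :=
  let p := pvAgo exp.toList [] []
  let tl := p.2 ++ [p.1]
  let tl := if tl.length > 0 then (if tl.head! ∉ pvF then [] else tl) else tl
  tl.map String.mk

-- ===== PORT B =====
-- needed by pvBgo's termination proof
theorem pvF_len_pos : ∀ f ∈ pvF, 0 < f.length := by decide

-- the while-loop of B on the remaining suffix exp[i:]
def pvBgo (l : List Char) : List (List Char) :=
  if hl : l = [] then []
  else
    match hf : pvF.find? (fun f => f.isPrefixOf l) with
    | some f => f :: pvBgo (l.drop f.length)
    | none => [l]
termination_by l.length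
decreasing_by
  have hmem := List.mem_of_find?_eq_some hf
  have := pvF_len_pos f hmem
  have : 0 < l.length := List.length_pos_iff.mpr hl
  simp only [List.length_drop]
  omega

def split_en_tokens_alt (exp : String) : List String :=
  let tokens := pvBgo exp.toList
  let tokens := if tokens ≠ [] ∧ tokens.head! ∉ pvF then [] else tokens
  tokens.map String.mk

-- ===== PRECONDITION & SPEC =====
def Spec_split_en_tokens (exp : String) (out : List String) : Prop := out = split_en_tokens_alt exp
instance (exp : String) (out : List String) : Decidable (Spec_split_en_tokens exp out) := by unfold Spec_split_en_tokens; infer_instance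

-- ===== CLAIM (what is proved, stated in full; the proofs are below) =====
def Claim_equal_split_en_tokens : Prop := ∀ (exp : String), Dom_split_en_tokens exp → Spec_split_en_tokens exp (split_en_tokens exp)

-- ===== LEMMAS AND PROOFS =====

-- the token-list A's loop eventually emits, as a standalone recursion
def pvH : List Char → List Char → List (List Char)
  | token, [] => [token]
  | token, c :: cs => if token ∈ pvF then token :: pvH [c] cs else pvH (token ++ [c]) cs

theorem pvAgo_H (l token : List Char) (acc : List (List Char)) :
    (pvAgo l token acc).2 ++ [(pvAgo l token acc).1] = acc ++ pvH token l := by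
  induction l generalizing token acc with
  | nil => simp [pvAgo, pvH]
  | cons c cs ih =>
    simp only [pvAgo, pvH]
    by_cases h : token ∈ pvF <;> simp [h, ih]

-- facts about the concrete name table
theorem pvF_ne_nil : ([] : List Char) ∉ pvF := by decide
theorem pvF_proper_prefix : ∀ f ∈ pvF, ∀ j, j < f.length → f.take j ∉ pvF := by decide

-- no prefix of (token ++ l) extending token is ever a name ⇒ the rest is one blob
theorem pvH_blob (l : List Char) : ∀ token, (∀ k, k ≤ l.length → token ++ l.take k ∉ pvF) →
    pvH token l = [token ++ l] := by
  induction l with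
  | nil => intro token _; simp [pvH]
  | cons c cs ih =>
    intro token h
    have h0 : token ∉ pvF := by simpa using h 0 (by simp)
    simp only [pvH, h0, if_false]
    rw [ih (token ++ [c])]
    · simp
    · intro k hk
      have := h (k + 1) (by simpa using hk)
      simpa using this

-- a name at the front is flushed exactly at its end
theorem pvH_name (f : List Char) (hf : f ∈ pvF) (rest : List Char) :
    pvH [] (f ++ rest) = f :: (if rest = [] then [] else pvH [] rest) := by
  suffices h : ∀ s p, p ++ s = f →
      pvH p (s ++ rest) = f :: (if rest = [] then [] else pvH [] rest) by
    exact h f [] rfl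
  intro s
  induction s with
  | nil =>
    intro p hp
    simp only [List.append_nil] at hp
    subst hp
    cases rest with
    | nil => simp [pvH]
    | cons c cs =>
      have h0 : ([] : List Char) ∉ pvF := pvF_ne_nil
      rw [if_neg (List.cons_ne_nil c cs)]
      simp only [List.nil_append]
      simp [pvH, hf, h0]
  | cons c cs ih =>
    intro p hp
    have hplen : p.length < f.length := by
      subst hp; simp
    have hptake : f.take p.length = p := by
      subst hp; simp
    have hpF : p ∉ pvF := by
      have := pvF_proper_prefix f hf p.length hplen
      rwa [hptake] at this
    simp only [List.cons_append, pvH, hpF, if_false]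
    exact ih (p ++ [c]) (by simpa using hp)

theorem pvBgo_nil : pvBgo [] = [] := by rw [pvBgo]; simp

theorem pvH_eq_pvBgo (l : List Char) (hl : l ≠ []) : pvH [] l = pvBgo l := by
  induction hn : l.length using Nat.strong_induction_on generalizing l with
  | _ n ih =>
  rw [pvBgo]
  simp only [hl, dite_false]
  cases hf : pvF.find? (fun f => f.isPrefixOf l) with
  | some f =>
    have hmem := List.mem_of_find?_eq_some hf
    have hpre : f.isPrefixOf l := by
      have := List.find?_some hf; simpa using this
    have hsplit : l = f ++ l.drop f.length := by
      have : f <+: l := List.isPrefixOf_iff_prefix.mp hpre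
      obtain ⟨t, ht⟩ := this
      rw [← ht]; simp
    have hpos := pvF_len_pos f hmem
    rw [show pvH [] l = pvH [] (f ++ l.drop f.length) by rw [← hsplit]]
    rw [pvH_name f hmem]
    by_cases hrest : l.drop f.length = []
    · simp [hrest, pvBgo_nil]
    · have hlen : (l.drop f.length).length < n := by
        subst hn; simp only [List.length_drop]
        have : 0 < l.length := List.length_pos_iff.mpr hl
        omega
      rw [ih _ hlen _ hrest rfl]
      simp [hrest]
  | none =>
    have hnone : ∀ f ∈ pvF, ¬ f.isPrefixOf l := by
      intro f hfm
      have := List.find?_eq_none.mp hf f hfm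
      simpa using this
    rw [pvH_blob]
    · simp
    · intro k hk hmem
      have : (l.take k).isPrefixOf l := by
        rw [List.isPrefixOf_iff_prefix]
        exact List.take_prefix k l
      have hmem' : (l.take k) ∈ pvF := by simpa using hmem
      exact hnone _ hmem' this

-- pvBgo is nonempty on nonempty input
theorem pvBgo_ne_nil (l : List Char) (hl : l ≠ []) : pvBgo l ≠ [] := by
  rw [pvBgo]
  simp only [hl, dite_false]
  cases hf : pvF.find? (fun f => f.isPrefixOf l) <;> simp

-- ===== VERDICT (by name: the statement is the Claim_ definition above) =====
theorem split_en_tokens_spec : Claim_equal_split_en_tokens := by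
  intro exp _
  unfold Spec_split_en_tokens split_en_tokens split_en_tokens_alt
  simp only []
  cases hl : exp.toList with
  | nil =>
    have h1 : pvAgo [] [] [] = ([], []) := rfl
    simp [h1, pvBgo_nil, pvF_ne_nil]
  | cons c cs =>
    have hne : exp.toList ≠ [] := by rw [hl]; simp
    have hA := pvAgo_H exp.toList [] []
    have hH : pvH [] exp.toList = pvBgo exp.toList := pvH_eq_pvBgo _ hne
    have hBne : pvBgo exp.toList ≠ [] := pvBgo_ne_nil _ hne
    simp only [List.nil_append] at hA
    rw [hl] at hA hH hBne
    rw [hA, hH]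
    have hlen : 0 < (pvBgo (c :: cs)).length := List.length_pos_iff.mpr hBne
    by_cases hhead : (pvBgo (c :: cs)).head! ∈ pvF
    · simp [hhead, hBne, hlen]
    · simp [hhead, hBne, hlen]
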